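-- pv_equiv track=rewrite | github.com/WeiDnite1222/Kitee | kitee_launcher/bk_core/instance/instance.py | _split_toml_value_comment
-- ===== SOURCE A (Python) =====
-- def _split_toml_value_comment(text):
--     in_string = False
--     escaped = False
--     quote_char = ""
--
--     for index, char in enumerate(text):
--         if escaped:
--             escaped = False
--             continue
--         if in_string and char == "\\":
--             escaped = True
--             continue
--         if char in ('"', "'"):
--             if in_string and char == quote_char:
--                 in_string = False
--                 quote_char = ""
--             elif not in_string:
--                 in_string = True
--                 quote_char = char
--             continue
--         if char == "#" and not in_string:
--             comment_start = index
--             while comment_start > 0 and text[comment_start - 1].isspace():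
--                 comment_start -= 1
--             return text[:comment_start].rstrip(), text[comment_start:]
--
--     return text.rstrip(), ""
-- ===== SOURCE B (Python) =====
-- def _split_toml_value_comment(text):
--     i = 0
--     n = len(text)
--     while i < n:
--         char = text[i]
--         if char in ('"', "'"):
--             quote_char = char
--             i += 1
--             while i < n:
--                 c = text[i]
--                 if c == "\\":
--                     i += 2
--                 elif c == quote_char:
--                     i += 1
--                     break
--                 else:
--                     i += 1
--             continue
--         if char == "#":
--             start = i
--             while start > 0 and text[start - 1].isspace():
--                 start -= 1
--             return text[:start].rstrip(), text[start:]
--         i += 1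
--     return text.rstrip(), ""
-- ===== Notes on version B (the rewrite author's own statement) =====
-- stated objective: alternative
-- what changed: Replaces A's single for-loop with per-character state flags (in_string/escaped/quote_char) by an index-driven outer while-loop whose inner loop skips each string literal wholesale (backslash skips the next char), so no state flags survive across iterations.
import Mathlib
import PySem

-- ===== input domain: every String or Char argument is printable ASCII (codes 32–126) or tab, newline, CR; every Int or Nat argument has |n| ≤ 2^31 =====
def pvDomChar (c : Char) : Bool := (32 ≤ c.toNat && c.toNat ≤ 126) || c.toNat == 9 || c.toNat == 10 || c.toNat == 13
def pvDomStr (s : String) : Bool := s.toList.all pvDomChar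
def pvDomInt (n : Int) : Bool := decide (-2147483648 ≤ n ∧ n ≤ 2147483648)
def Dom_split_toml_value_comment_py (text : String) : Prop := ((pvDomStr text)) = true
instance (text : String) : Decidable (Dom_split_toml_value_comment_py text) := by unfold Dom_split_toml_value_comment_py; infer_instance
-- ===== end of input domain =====

-- B replaces A's per-character flag machine (in_string/escaped/quote_char) by an index-driven
-- outer scan with an inner loop that skips over each string literal; same O(n) cost, different decomposition.

-- ===== PORT A =====
-- while comment_start > 0 and text[comment_start-1].isspace(): comment_start -= 1
def pvABack (text : List Char) : Nat → Nat
  | 0 => 0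
  | k + 1 => if PySem.Chars.isspace (text.getD k 'x') then pvABack text k else k + 1

-- the for-loop: state (in_string, escaped, quote_char); quote_char "" ↦ none
def pvALoop (text : List Char) : Nat → List Char → Bool → Bool → Option Char → String × String
  | _, [], _, _, _ => (String.ofList (PySem.Chars.rstrip text), "")
  | i, c :: cs, inStr, escaped, quote =>
    if escaped then pvALoop text (i + 1) cs inStr false quote
    else if inStr && c == '\\' then pvALoop text (i + 1) cs inStr true quote
    else if c == '"' || c == '\'' then
      (if inStr && some c == quote then pvALoop text (i + 1) cs false false none
       else if !inStr then pvALoop text (i + 1) cs true false (some c)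
       else pvALoop text (i + 1) cs inStr escaped quote)
    else if c == '#' && !inStr then
      let s := pvABack text i
      (String.ofList (PySem.Chars.rstrip (text.take s)), String.ofList (text.drop s))
    else pvALoop text (i + 1) cs inStr escaped quote

def split_toml_value_comment_py (text : String) : String × String :=
  pvALoop text.toList 0 text.toList false false none

-- ===== PORT B =====
-- B's inner loop: advance past a string literal opened with quote q (backslash skips the next char)
def pvBSkip (q : Char) : Nat → List Char → Nat × List Char
  | i, [] => (i, [])
  | i, c :: cs =>
    if c == '\\' then
      match cs with
      | [] => (i + 2, [])
      | _ :: cs' => pvBSkip q (i + 2) cs'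
    else if c == q then (i + 1, cs)
    else pvBSkip q (i + 1) cs

theorem pvBSkip_len (q : Char) (i : Nat) (rest : List Char) :
    (pvBSkip q i rest).2.length ≤ rest.length := by
  fun_induction pvBSkip q i rest <;> simp_all <;> omega

-- B's backtrack over whitespace before '#'
def pvBBack (text : List Char) : Nat → Nat
  | 0 => 0
  | k + 1 => if PySem.Chars.isspace (text.getD k 'x') then pvBBack text k else k + 1

-- B's outer while-loop over index i (remaining suffix carried as a list)
def pvBOuter (text : List Char) : Nat → List Char → String × String
  | _, [] => (String.ofList (PySem.Chars.rstrip text), "")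
  | i, c :: cs =>
    if c == '"' || c == '\'' then
      let p := pvBSkip c (i + 1) cs
      pvBOuter text p.1 p.2
    else if c == '#' then
      let s := pvBBack text i
      (String.ofList (PySem.Chars.rstrip (text.take s)), String.ofList (text.drop s))
    else pvBOuter text (i + 1) cs
termination_by _ rest => rest.length
decreasing_by
  · exact Nat.lt_succ_of_le (pvBSkip_len _ _ _)
  · simp

def split_toml_value_comment_py_alt (text : String) : String × String :=
  pvBOuter text.toList 0 text.toList

-- ===== PRECONDITION & SPEC =====
def Spec_split_toml_value_comment_py (text : String) (out : String × String) : Prop := out = split_toml_value_comment_py_alt text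
instance (text : String) (out : String × String) : Decidable (Spec_split_toml_value_comment_py text out) := by unfold Spec_split_toml_value_comment_py; infer_instance

-- ===== CLAIM (what is proved, stated in full; the proofs are below) =====
def Claim_equal_split_toml_value_comment_py : Prop := ∀ (text : String), Dom_split_toml_value_comment_py text → Spec_split_toml_value_comment_py text (split_toml_value_comment_py text)

-- ===== LEMMAS AND PROOFS =====

theorem pvBack_eq (text : List Char) : ∀ k, pvBBack text k = pvABack text k := by
  intro k
  induction k with
  | zero => rfl
  | succ k ih => simp [pvBBack, pvABack, ih]

-- in-string state of A = skipping the literal, then back to the top-level state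
theorem pvSkip_eq (text : List Char) : ∀ (rest : List Char) (i : Nat) (q : Char),
    (q = '"' ∨ q = '\'') →
    pvALoop text i rest true false (some q) =
      pvALoop text (pvBSkip q i rest).1 (pvBSkip q i rest).2 false false none := by
  intro rest i q hq
  fun_induction pvBSkip q i rest <;> rcases hq with rfl | rfl <;> simp_all [pvALoop]

-- top-level state of A = B's outer loop
theorem pvMain (text : List Char) : ∀ (i : Nat) (rest : List Char),
    pvALoop text i rest false false none = pvBOuter text i rest := by
  intro i rest
  fun_induction pvBOuter text i rest with
  | case1 => rfl
  | case2 i c cs p h ih => simp_all [pvALoop, pvSkip_eq]; exact ih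
  | case3 i c cs h1 s h2 =>
      simp_all [pvALoop, ← pvBack_eq]
      exact ⟨rfl, rfl⟩
  | case4 i c cs h1 h2 ih => simp_all [pvALoop]

-- ===== VERDICT (by name: the statement is the Claim_ definition above) =====
theorem split_toml_value_comment_py_spec : Claim_equal_split_toml_value_comment_py := by
  intro text _
  unfold Spec_split_toml_value_comment_py split_toml_value_comment_py split_toml_value_comment_py_alt
  exact pvMain text.toList 0 text.toList
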